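-- pv_equiv track=rewrite | github.com/Stanford-ILIAD/teaching | compile/lib/omniglot/digits_utils.py | create_line_sequence_dict
-- ===== SOURCE A (Python) =====
-- def create_line_sequence_dict(skill_len):
--     states_x=[0]
--     states_y=[0]
--     actions_x = []
--     actions_y = []
--     for i in range(skill_len):
--         actions_x.append(1)
--         actions_y.append(0)
--         states_x.append(states_x[-1]+(actions_x[-1]))
--         states_y.append(states_y[-1]+(actions_y[-1]))
--     char_dict = {"states":[(states_x[i], states_y[i]) for i in range(len(states_x))],
-- "actions": [(actions_x[i], actions_y[i]) for i in range(len(actions_x))]}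
--     return char_dict
-- ===== SOURCE B (Python) =====
-- def create_line_sequence_dict(skill_len):
--     n = max(skill_len, 0)
--     return {"states": [(i, 0) for i in range(n + 1)],
--             "actions": [(1, 0)] * n}
-- ===== Notes on version B (the rewrite author's own statement) =====
-- stated objective: simpler
-- what changed: Replaces the four-list incremental accumulation loop with a closed-form construction: states are (i,0) for i in range(n+1) and actions are n copies of (1,0), with n = max(skill_len, 0).
import Mathlib
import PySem

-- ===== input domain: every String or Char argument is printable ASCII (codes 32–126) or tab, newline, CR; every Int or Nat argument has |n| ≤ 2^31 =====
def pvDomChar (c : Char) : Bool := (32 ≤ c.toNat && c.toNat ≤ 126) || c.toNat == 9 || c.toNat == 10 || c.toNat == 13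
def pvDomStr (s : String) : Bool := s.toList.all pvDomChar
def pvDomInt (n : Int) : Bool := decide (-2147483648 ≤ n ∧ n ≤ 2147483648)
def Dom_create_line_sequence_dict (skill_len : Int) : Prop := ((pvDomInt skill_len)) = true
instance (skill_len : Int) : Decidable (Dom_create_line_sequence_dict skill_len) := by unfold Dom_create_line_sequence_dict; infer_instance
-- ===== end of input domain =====

-- B drops A's incremental accumulation loop in favour of a closed-form construction (objective: simpler).

-- ===== PORT A =====
-- the loop body of A: appends to the four lists; xs[-1] on these always-nonempty
-- lists is ported as PySem.List.pyGetD xs (-1) 0 (exact: the default is never used)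
def pvStepA (s : List Int × List Int × List Int × List Int) (_i : Int) :
    List Int × List Int × List Int × List Int :=
  let ax := s.2.2.1 ++ [1]
  let ay := s.2.2.2 ++ [0]
  let sx := s.1 ++ [PySem.List.pyGetD s.1 (-1) 0 + PySem.List.pyGetD ax (-1) 0]
  let sy := s.2.1 ++ [PySem.List.pyGetD s.2.1 (-1) 0 + PySem.List.pyGetD ay (-1) 0]
  (sx, sy, ax, ay)

def create_line_sequence_dict (skill_len : Int) : List (String × List (Int × Int)) :=
  let st := (PySem.List.pyRange 0 skill_len 1).foldl pvStepA ([0], [0], [], [])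
  let states_x := st.1
  let states_y := st.2.1
  let actions_x := st.2.2.1
  let actions_y := st.2.2.2
  [("states", (PySem.List.pyRange 0 (states_x.length : Int) 1).map
      (fun i => (PySem.List.pyGetD states_x i 0, PySem.List.pyGetD states_y i 0))),
   ("actions", (PySem.List.pyRange 0 (actions_x.length : Int) 1).map
      (fun i => (PySem.List.pyGetD actions_x i 0, PySem.List.pyGetD actions_y i 0)))]

-- ===== PORT B =====
def create_line_sequence_dict_alt (skill_len : Int) : List (String × List (Int × Int)) :=
  let n := max skill_len 0
  [("states", (PySem.List.pyRange 0 (n + 1) 1).map (fun i => (i, 0))),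
   ("actions", List.replicate n.toNat (1, 0))]

-- ===== PRECONDITION & SPEC =====
def Spec_create_line_sequence_dict (skill_len : Int) (out : List (String × List (Int × Int))) : Prop := out = create_line_sequence_dict_alt skill_len
instance (skill_len : Int) (out : List (String × List (Int × Int))) : Decidable (Spec_create_line_sequence_dict skill_len out) := by unfold Spec_create_line_sequence_dict; infer_instance

-- ===== CLAIM (what is proved, stated in full; the proofs are below) =====
def Claim_equal_create_line_sequence_dict : Prop := ∀ (skill_len : Int), Dom_create_line_sequence_dict skill_len → Spec_create_line_sequence_dict skill_len (create_line_sequence_dict skill_len)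

-- ===== LEMMAS AND PROOFS =====

-- A's loop invariant: after m iterations the four lists are in closed form
lemma pvLoopInv (m : Nat) :
    ((List.range m).map (fun k : Nat => (0 : Int) + k)).foldl pvStepA ([0], [0], [], []) =
      ((List.range (m + 1)).map (fun k : Nat => (k : Int)),
       List.replicate (m + 1) (0 : Int),
       List.replicate m (1 : Int),
       List.replicate m (0 : Int)) := by
  induction m with
  | zero => rfl
  | succ m ih =>
    rw [List.range_succ, List.map_append, List.foldl_append, ih]
    simp only [List.map_cons, List.map_nil, List.foldl_cons, List.foldl_nil, pvStepA]
    refine Prod.ext ?_ (Prod.ext ?_ (Prod.ext ?_ ?_)) <;>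
      simp [List.range_succ, List.replicate_succ' (n := m), List.replicate_succ' (n := m + 1),
        PySem.List.pyGetD, PySem.List.pyGet?, PySem.List.pyIdx?]

theorem create_line_sequence_dict_spec_aux (skill_len : Int) :
    create_line_sequence_dict skill_len = create_line_sequence_dict_alt skill_len := by
  have hmax : max skill_len 0 = (skill_len.toNat : Int) := (Int.toNat_eq_max skill_len).symm
  unfold create_line_sequence_dict create_line_sequence_dict_alt
  rw [PySem.List.pyRange_one, hmax]
  simp only [Int.sub_zero]
  rw [pvLoopInv skill_len.toNat]
  generalize skill_len.toNat = m
  have hc : ((m : Int) + 1) = ((m + 1 : Nat) : Int) := by push_cast; ring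
  simp only [List.length_map, List.length_range, List.length_replicate, hc, Int.toNat_natCast,
    PySem.List.pyRange_zero_nat, List.map_map, List.cons.injEq, Prod.mk.injEq, and_true]
  refine ⟨⟨trivial, ?_⟩, trivial, ?_⟩
  · refine List.map_congr_left (fun k hk => ?_)
    have hk' : k < m + 1 := List.mem_range.mp hk
    simp only [Function.comp_apply, PySem.List.pyGetD_natCast,
      PySem.List.getD_map_range _ _ _ _ hk', List.getD_replicate _ hk']
  · rw [List.eq_replicate_iff]
    refine ⟨by simp, fun x hx => ?_⟩
    obtain ⟨k, hk, rfl⟩ := List.mem_map.mp hx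
    have hk' : k < m := List.mem_range.mp hk
    simp only [Function.comp_apply, PySem.List.pyGetD_natCast, List.getD_replicate _ hk']

-- ===== VERDICT (by name: the statement is the Claim_ definition above) =====
theorem create_line_sequence_dict_spec : Claim_equal_create_line_sequence_dict := by
  intro skill_len _
  exact create_line_sequence_dict_spec_aux skill_len
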